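-- pv_equiv track=rewrite | github.com/jamesconfy/Algorithms | possibleChanges.py | possibleChanges
-- ===== SOURCE A (Python) =====
-- def possibleChanges(usernames):
--     # Write your code here
--     answer = []
--     for user in usernames:
--         res = []
--         for i in range(len(user)):
--             res.append(ord(user[i]))
--
--         ress = sorted(res)
--         j = 0
--         while j <= len(user)-1:
--             if j == len(user)-1:
--                 answer.append('NO')
--             elif ress[j] < res[j]:
--                 answer.append('YES')
--                 j = len(user)-1
--
--             j += 1
--
--     return answer
-- ===== SOURCE B (Python) =====
-- def possibleChanges(usernames):
--     # A username needs a change ('YES') exactly when some adjacent character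
--     # pair descends; decided by a direct adjacent-pair check instead of sorting.
--     # Like A, an empty username yields no answer (A's while loop never runs for it).
--     return ['YES' if any(a > b for a, b in zip(u, u[1:])) else 'NO'
--             for u in usernames if u]
-- ===== Notes on version B (the rewrite author's own statement) =====
-- stated objective: simpler
-- what changed: Instead of building the ord list, sorting it and scanning for a position where the sorted copy is smaller, B decides each username with a direct adjacent-pair descent check in one comprehension (matching A, empty usernames contribute no answer).
import Mathlib
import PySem

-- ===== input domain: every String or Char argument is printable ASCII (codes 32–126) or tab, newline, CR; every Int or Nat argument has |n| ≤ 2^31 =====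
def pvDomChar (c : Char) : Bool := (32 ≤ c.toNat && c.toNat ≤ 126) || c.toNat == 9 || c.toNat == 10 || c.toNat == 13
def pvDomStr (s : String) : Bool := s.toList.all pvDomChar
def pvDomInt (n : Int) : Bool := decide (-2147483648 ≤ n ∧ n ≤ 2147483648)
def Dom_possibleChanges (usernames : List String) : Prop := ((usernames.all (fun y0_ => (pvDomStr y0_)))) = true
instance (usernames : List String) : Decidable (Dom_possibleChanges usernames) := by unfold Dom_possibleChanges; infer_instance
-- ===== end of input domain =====

-- B replaces A's sort-and-scan by a direct adjacent-pair descent check per username;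
-- like A it emits no answer for an empty username.

-- ===== PORT A =====
-- the 'while j <= len(user)-1' loop; fuel (length+1) only makes the recursion total,
-- it is always sufficient since j grows by at least 1 per iteration
def pvWhileA (res ress : List Int) (n : Int) : Nat → Int → List String
  | 0, _ => []
  | fuel + 1, j =>
    if j ≤ n - 1 then
      if j = n - 1 then
        "NO" :: pvWhileA res ress n fuel (j + 1)
      else if PySem.List.pyGetD ress j 0 < PySem.List.pyGetD res j 0 then
        "YES" :: pvWhileA res ress n fuel ((n - 1) + 1)
      else
        pvWhileA res ress n fuel (j + 1)
    else []

def possibleChanges (usernames : List String) : List String :=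
  usernames.foldl (fun answer user =>
    let res : List Int := user.toList.map (fun c => (c.toNat : Int))
    let ress := PySem.List.sorted res (fun x => x) false
    answer ++ pvWhileA res ress (user.toList.length : Int) (user.toList.length + 1) 0) []

-- ===== PORT B =====
-- any(a > b for a, b in zip(u, u[1:]))
def pvHasDescent : List Char → Bool
  | a :: b :: rest => decide (b < a) || pvHasDescent (b :: rest)
  | _ => false

def possibleChanges_alt (usernames : List String) : List String :=
  (usernames.filter (fun u => u ≠ "")).map (fun u => if pvHasDescent u.toList then "YES" else "NO")

-- ===== PRECONDITION & SPEC =====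
def Spec_possibleChanges (usernames : List String) (out : List String) : Prop := out = possibleChanges_alt usernames
instance (usernames : List String) (out : List String) : Decidable (Spec_possibleChanges usernames out) := by unfold Spec_possibleChanges; infer_instance

-- ===== CLAIM (what is proved, stated in full; the proofs are below) =====
def Claim_equal_possibleChanges : Prop := ∀ (usernames : List String), Dom_possibleChanges usernames → Spec_possibleChanges usernames (possibleChanges usernames)

-- ===== LEMMAS AND PROOFS =====

-- once j is past the loop bound the loop produces nothing
theorem pvWhileA_exit (res ress : List Int) (n : Int) (fuel : Nat) (j : Int)
    (h : ¬ j ≤ n - 1) : pvWhileA res ress n fuel j = [] := by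
  cases fuel with
  | zero => rfl
  | succ fuel => simp [pvWhileA, h]

-- loop result when the sorted copy equals the original: one "NO"
theorem pvWhileA_no (res : List Int) (n : Int) (fuel : Nat) :
    ∀ j : Int, 0 ≤ j → j ≤ n - 1 → n ≤ j + fuel →
    pvWhileA res res n fuel j = ["NO"] := by
  induction fuel with
  | zero => intro j h0 h1 h2; omega
  | succ fuel ih =>
    intro j h0 h1 h2
    by_cases hend : j = n - 1
    · simp only [pvWhileA, if_pos h1, if_pos hend]
      rw [hend, pvWhileA_exit res res n fuel (n - 1 + 1) (by omega)]
    · have hnlt : ¬ PySem.List.pyGetD res j 0 < PySem.List.pyGetD res j 0 := lt_irrefl _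
      simp only [pvWhileA, if_pos h1, if_neg hend, if_neg hnlt]
      exact ih (j + 1) (by omega) (by omega) (by omega)

-- loop result when position k (< n-1) is the first where sorted < original: one "YES"
theorem pvWhileA_yes (res ress : List Int) (n : Int) (k : Nat)
    (hk : (k : Int) < n - 1)
    (heq : ∀ j : Nat, j < k → ress.getD j 0 = res.getD j 0)
    (hlt : ress.getD k 0 < res.getD k 0) (fuel : Nat) :
    ∀ j : Nat, j ≤ k → (k : Int) < (j : Int) + fuel →
    pvWhileA res ress n fuel j = ["YES"] := by
  induction fuel with
  | zero => intro j h0 h2; omega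
  | succ fuel ih =>
    intro j h0 h2
    have hle : (j : Int) ≤ n - 1 := by omega
    have hne : (j : Int) ≠ n - 1 := by omega
    by_cases hjk : j = k
    · subst hjk
      have hlt' : PySem.List.pyGetD ress (j : Int) 0 < PySem.List.pyGetD res (j : Int) 0 := by
        simpa [PySem.List.pyGetD_natCast, List.getD_eq_getElem?_getD] using hlt
      simp only [pvWhileA, if_pos hle, if_neg hne, if_pos hlt']
      rw [pvWhileA_exit res ress n fuel (n - 1 + 1) (by omega)]
    · have heqj : PySem.List.pyGetD ress (j : Int) 0 = PySem.List.pyGetD res (j : Int) 0 := by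
        simpa [PySem.List.pyGetD_natCast, List.getD_eq_getElem?_getD] using heq j (by omega)
      have hnlt : ¬ PySem.List.pyGetD ress (j : Int) 0 < PySem.List.pyGetD res (j : Int) 0 := by
        rw [heqj]; exact lt_irrefl _
      simp only [pvWhileA, if_pos hle, if_neg hne, if_neg hnlt]
      have := ih (j + 1) (by omega) (by push_cast; omega)
      push_cast at this
      exact this

-- a sorted permutation that differs from the original has a first differing index k,
-- there it is strictly smaller, and k + 1 < length
theorem firstDiff (ress res : List Int) (hperm : ress.Perm res)
    (hsort : ress.Pairwise (· ≤ ·)) (hne : ress ≠ res) :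
    ∃ k : Nat, k + 1 < ress.length ∧
      (∀ j : Nat, j < k → ress.getD j 0 = res.getD j 0) ∧
      ress.getD k 0 < res.getD k 0 := by
  induction ress generalizing res with
  | nil => cases hperm.nil_eq; simp at hne
  | cons a t1 ih =>
    cases res with
    | nil => exact absurd hperm.symm.nil_eq (by simp)
    | cons b t2 =>
      by_cases hab : a = b
      · subst hab
        have hperm' : t1.Perm t2 := hperm.cons_inv
        have hne' : t1 ≠ t2 := by intro h; exact hne (by rw [h])
        obtain ⟨k, hk1, hk2, hk3⟩ := ih t2 hperm' (List.pairwise_cons.mp hsort).2 hne'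
        refine ⟨k + 1, by simpa using hk1, ?_, by simpa using hk3⟩
        intro j hj
        cases j with
        | zero => simp
        | succ j => simpa using hk2 j (by omega)
      · refine ⟨0, ?_, by intro j hj; omega, ?_⟩
        · cases t1 with
          | nil =>
            cases t2 with
            | nil =>
              have h := List.perm_singleton.mp hperm
              simp at h
              exact absurd h hab
            | cons c t => have := hperm.length_eq; simp at this
          | cons c t => simp
        · have hb : b ∈ a :: t1 := hperm.symm.subset (List.mem_cons_self)
          have hb' : b ∈ t1 := by
            cases hb with
            | head => exact absurd rfl hab
            | tail _ h => exact h
          have hle : a ≤ b := (List.pairwise_cons.mp hsort).1 b hb'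
          simp only [List.getD_cons_zero]
          omega

theorem char_le_iff_ord_le (a b : Char) : a ≤ b ↔ (a.toNat : Int) ≤ (b.toNat : Int) := by
  constructor <;> intro h
  · have h1 : a.toNat ≤ b.toNat := h
    omega
  · have h1 : a.toNat ≤ b.toNat := by omega
    exact Char.le_def.mpr h1

-- pvHasDescent = false exactly when the ord list is weakly ascending
theorem hasDescent_false_iff (l : List Char) :
    pvHasDescent l = false ↔ (l.map (fun c => (c.toNat : Int))).Pairwise (· ≤ ·) := by
  induction l with
  | nil => simp [pvHasDescent]
  | cons a t ih =>
    cases t with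
    | nil => simp [pvHasDescent]
    | cons b t =>
      simp only [pvHasDescent, Bool.or_eq_false_iff, decide_eq_false_iff_not, not_lt,
        List.map_cons, List.pairwise_cons] at ih ⊢
      constructor
      · rintro ⟨hba, hrest⟩
        obtain ⟨hbt, hpt⟩ := ih.mp hrest
        refine ⟨?_, hbt, hpt⟩
        intro x hx
        have hab : (a.toNat : Int) ≤ (b.toNat : Int) := (char_le_iff_ord_le a b).mp hba
        rcases List.mem_cons.mp hx with h | h
        · omega
        · have := hbt x h; omega
      · rintro ⟨hhead, hbt, hpt⟩
        refine ⟨?_, ih.mpr ⟨hbt, hpt⟩⟩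
        have hab : (a.toNat : Int) ≤ (b.toNat : Int) := hhead _ List.mem_cons_self
        exact (char_le_iff_ord_le a b).mpr hab

-- per-user: for a nonempty username the A-loop emits exactly B's one answer
theorem perUser (user : String) (hne : user ≠ "") :
    pvWhileA (user.toList.map (fun c => (c.toNat : Int)))
      (PySem.List.sorted (user.toList.map (fun c => (c.toNat : Int))) (fun x => x) false)
      (user.toList.length : Int) (user.toList.length + 1) 0
    = [if pvHasDescent user.toList then "YES" else "NO"] := by
  set chars := user.toList with hchars
  have hlen : chars ≠ [] := by
    intro h
    exact hne (String.toList_inj.mp (h.trans rfl))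
  set res : List Int := chars.map (fun c => (c.toNat : Int)) with hres
  set ress := PySem.List.sorted res (fun x => x) false with hress
  have hperm : ress.Perm res := PySem.List.sorted_perm res (fun x => x) false
  have hsort : ress.Pairwise (· ≤ ·) := by
    simpa using PySem.List.sorted_pairwise (key := fun x => x) (xs := res)
  by_cases hdesc : pvHasDescent chars = true
  · rw [if_pos hdesc]
    have hnes : ress ≠ res := by
      intro h
      have hpw : res.Pairwise (· ≤ ·) := h ▸ hsort
      have : pvHasDescent chars = false := (hasDescent_false_iff chars).mpr (by simpa [hres] using hpw)
      rw [hdesc] at this; exact Bool.noConfusion this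
    obtain ⟨k, hk1, hk2, hk3⟩ := firstDiff ress res hperm hsort hnes
    have hrl : ress.length = res.length := hperm.length_eq
    have hresl : res.length = chars.length := by simp [hres]
    exact pvWhileA_yes res ress (chars.length : Int) k (by omega) hk2 hk3
      (chars.length + 1) 0 (by omega) (by push_cast; omega)
  · rw [if_neg hdesc]
    have hdesc' : pvHasDescent chars = false := by simpa using hdesc
    have hpw : res.Pairwise (· ≤ ·) := by
      simpa [hres] using (hasDescent_false_iff chars).mp hdesc'
    have hss : ress = res := PySem.List.sorted_eq_self_of_pairwise res (fun x => x) (by simpa using hpw)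
    rw [hss]
    have hlp : 0 < chars.length := List.length_pos_iff.mpr hlen
    exact pvWhileA_no res (chars.length : Int) (chars.length + 1) 0 (by omega) (by omega) (by omega)

-- the foldl with 'answer ++ …' is the flatMap of the per-user pieces
theorem foldl_flat (l : List String) (acc : List String)
    (F : String → List String) :
    l.foldl (fun answer user => answer ++ F user) acc = acc ++ l.flatMap F := by
  induction l generalizing acc with
  | nil => simp
  | cons u t ih => simp [ih, List.flatMap_cons]

theorem possibleChanges_eq_flatMap (usernames : List String) :
    possibleChanges usernames = usernames.flatMap (fun user =>
      pvWhileA (user.toList.map (fun c => (c.toNat : Int)))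
        (PySem.List.sorted (user.toList.map (fun c => (c.toNat : Int))) (fun x => x) false)
        (user.toList.length : Int) (user.toList.length + 1) 0) := by
  unfold possibleChanges
  exact foldl_flat usernames [] _

-- the flatMap of the per-user pieces is B's map over the nonempty usernames
theorem flat_eq_map (l : List String) :
    l.flatMap (fun user =>
      pvWhileA (user.toList.map (fun c => (c.toNat : Int)))
        (PySem.List.sorted (user.toList.map (fun c => (c.toNat : Int))) (fun x => x) false)
        (user.toList.length : Int) (user.toList.length + 1) 0)
    = (l.filter (fun u => u ≠ "")).map (fun u => if pvHasDescent u.toList then "YES" else "NO") := by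
  induction l with
  | nil => rfl
  | cons u t ih =>
    by_cases hu : u = ""
    · subst hu
      rw [List.flatMap_cons, List.filter_cons_of_neg (by simp), ih]
      rfl
    · rw [List.flatMap_cons, List.filter_cons_of_pos (by simp [hu]), List.map_cons,
        perUser u hu, ih]
      rfl

-- ===== VERDICT (by name: the statement is the Claim_ definition above) =====
theorem possibleChanges_spec : Claim_equal_possibleChanges := by
  intro usernames _
  show possibleChanges usernames = possibleChanges_alt usernames
  rw [possibleChanges_eq_flatMap, flat_eq_map usernames]
  rfl
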